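-- pv_equiv track=rewrite | github.com/QHQsky5295/serverless_llm_experiment_retry14_baseline | scripts/materialize_punica_loras.py | _resolve_punica_rank
-- ===== SOURCE A (Python) =====
-- SUPPORTED_PUNICA_RANKS = (16, 32, 64, 96, 128)
--
-- def _resolve_punica_rank(rank: int) -> int:
--     for supported in SUPPORTED_PUNICA_RANKS:
--         if rank <= supported:
--             return supported
--     raise RuntimeError(
--         f"unsupported LoRA rank {rank}; Punica official kernels only support "
--         f"{SUPPORTED_PUNICA_RANKS}"
--     )
-- ===== SOURCE B (Python) =====
-- import bisect
--
-- SUPPORTED_PUNICA_RANKS = (16, 32, 64, 96, 128)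
--
-- def _resolve_punica_rank(rank: int) -> int:
--     i = bisect.bisect_left(SUPPORTED_PUNICA_RANKS, rank)
--     if i == len(SUPPORTED_PUNICA_RANKS):
--         raise RuntimeError(
--             f"unsupported LoRA rank {rank}; Punica official kernels only support "
--             f"{SUPPORTED_PUNICA_RANKS}"
--         )
--     return SUPPORTED_PUNICA_RANKS[i]
-- ===== Notes on version B (the rewrite author's own statement) =====
-- stated objective: idiomatic
-- what changed: Replaced the linear scan over the rank tuple with bisect.bisect_left binary search for the first supported rank >= rank, raising the identical RuntimeError when none exists.
import Mathlib
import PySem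

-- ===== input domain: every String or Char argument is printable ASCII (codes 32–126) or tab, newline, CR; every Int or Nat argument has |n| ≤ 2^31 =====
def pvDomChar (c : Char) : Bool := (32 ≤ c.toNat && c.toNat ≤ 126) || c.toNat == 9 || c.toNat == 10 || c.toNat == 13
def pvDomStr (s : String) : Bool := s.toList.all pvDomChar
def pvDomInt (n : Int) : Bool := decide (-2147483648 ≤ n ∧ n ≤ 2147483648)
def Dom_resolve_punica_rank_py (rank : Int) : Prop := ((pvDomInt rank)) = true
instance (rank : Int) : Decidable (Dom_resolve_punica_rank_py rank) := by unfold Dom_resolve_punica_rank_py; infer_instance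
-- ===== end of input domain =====

-- B replaces A's linear scan of SUPPORTED_PUNICA_RANKS with a bisect_left binary
-- search (idiomatic); both raise the same RuntimeError for rank > 128 (outside Pre_).

-- ===== PORT A =====
-- SUPPORTED_PUNICA_RANKS = (16, 32, 64, 96, 128)
def pvSupportedRanks : List Int := [16, 32, 64, 96, 128]

-- the for-loop: return the first supported with rank <= supported; the fall-through
-- `raise RuntimeError` returns no value, so Pre_ excludes those inputs (0 is a dummy).
def pvScan (rank : Int) : List Int → Int
  | [] => 0
  | supported :: rest => if rank ≤ supported then supported else pvScan rank rest

def resolve_punica_rank_py (rank : Int) : Int := pvScan rank pvSupportedRanks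

-- ===== PORT B =====
-- bisect.bisect_left on a list of Int: classic lo/hi halving loop (exact port of CPython's bisect_left)
def pvBisectLeft (xs : List Int) (x : Int) (lo hi : Nat) : Nat :=
  if h : lo < hi then
    let mid := (lo + hi) / 2
    if xs.getD mid 0 < x then pvBisectLeft xs x (mid + 1) hi
    else pvBisectLeft xs x lo mid
  else lo
termination_by hi - lo
decreasing_by all_goals omega

-- i == len(...) means Python raises (excluded by Pre_; 0 is a dummy), else return SUPPORTED_PUNICA_RANKS[i]
def resolve_punica_rank_py_alt (rank : Int) : Int :=
  let i := pvBisectLeft pvSupportedRanks rank 0 pvSupportedRanks.length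
  if i = pvSupportedRanks.length then 0 else pvSupportedRanks.getD i 0

-- ===== PRECONDITION & SPEC =====
-- Pre_ excludes exactly rank > 128, where both A and B raise the RuntimeError.
def Pre_resolve_punica_rank_py (rank : Int) : Prop := rank ≤ 128
instance (rank : Int) : Decidable (Pre_resolve_punica_rank_py rank) := by unfold Pre_resolve_punica_rank_py; infer_instance
def pvWitness_resolve_punica_rank_py : Int := 20

def Spec_resolve_punica_rank_py (rank : Int) (out : Int) : Prop := out = resolve_punica_rank_py_alt rank
instance (rank : Int) (out : Int) : Decidable (Spec_resolve_punica_rank_py rank out) := by unfold Spec_resolve_punica_rank_py; infer_instance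

-- ===== CLAIM (what is proved, stated in full; the proofs are below) =====
def Claim_equal_resolve_punica_rank_py : Prop := ∀ (rank : Int), Dom_resolve_punica_rank_py rank → Pre_resolve_punica_rank_py rank → Spec_resolve_punica_rank_py rank (resolve_punica_rank_py rank)

-- ===== LEMMAS AND PROOFS =====

-- ===== VERDICT (by name: the statement is the Claim_ definition above) =====
lemma pvBL_step (xs : List Int) (x : Int) (lo hi : Nat) :
    pvBisectLeft xs x lo hi =
      if lo < hi then
        (if xs.getD ((lo + hi) / 2) 0 < x then pvBisectLeft xs x ((lo + hi) / 2 + 1) hi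
         else pvBisectLeft xs x lo ((lo + hi) / 2))
      else lo := by
  rw [pvBisectLeft]; split <;> simp_all

-- evaluate B's binary search over the concrete 5-element list, interval by interval
lemma pvAlt_eval (rank : Int) (h : rank ≤ 128) :
    resolve_punica_rank_py_alt rank =
      if rank ≤ 16 then 16 else if rank ≤ 32 then 32 else if rank ≤ 64 then 64
      else if rank ≤ 96 then 96 else 128 := by
  unfold resolve_punica_rank_py_alt
  rcases (by omega : rank ≤ 16 ∨ (16 < rank ∧ rank ≤ 32) ∨ (32 < rank ∧ rank ≤ 64) ∨
      (64 < rank ∧ rank ≤ 96) ∨ (96 < rank ∧ rank ≤ 128)) with h1 | h1 | h1 | h1 | h1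
  · rw [pvBL_step]; norm_num [pvSupportedRanks]
    rw [if_neg (show ¬(64:Int) < rank by omega), pvBL_step]; norm_num
    rw [if_neg (show ¬(32:Int) < rank by omega), pvBL_step]; norm_num
    rw [if_neg (show ¬(16:Int) < rank by omega), pvBL_step]; norm_num
    omega
  · rw [pvBL_step]; norm_num [pvSupportedRanks]
    rw [if_neg (show ¬(64:Int) < rank by omega), pvBL_step]; norm_num
    rw [if_neg (show ¬(32:Int) < rank by omega), pvBL_step]; norm_num
    rw [if_pos (show (16:Int) < rank by omega), pvBL_step]; norm_num
    omega
  · rw [pvBL_step]; norm_num [pvSupportedRanks]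
    rw [if_neg (show ¬(64:Int) < rank by omega), pvBL_step]; norm_num
    rw [if_pos (show (32:Int) < rank by omega), pvBL_step]; norm_num
    omega
  · rw [pvBL_step]; norm_num [pvSupportedRanks]
    rw [if_pos (show (64:Int) < rank by omega), pvBL_step]; norm_num
    rw [if_neg (show ¬(128:Int) < rank by omega), pvBL_step]; norm_num
    rw [if_neg (show ¬(96:Int) < rank by omega), pvBL_step]; norm_num
    omega
  · rw [pvBL_step]; norm_num [pvSupportedRanks]
    rw [if_pos (show (64:Int) < rank by omega), pvBL_step]; norm_num
    rw [if_neg (show ¬(128:Int) < rank by omega), pvBL_step]; norm_num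
    rw [if_pos (show (96:Int) < rank by omega), pvBL_step]; norm_num
    omega

theorem resolve_punica_rank_py_spec : Claim_equal_resolve_punica_rank_py := by
  intro rank _ hp
  unfold Pre_resolve_punica_rank_py at hp
  unfold Spec_resolve_punica_rank_py resolve_punica_rank_py pvSupportedRanks pvScan
  rw [pvAlt_eval rank hp]
  simp only [pvScan]
  split_ifs <;> omega
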